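-- pv_equiv track=rewrite | github.com/MKBD0102/Algorithm_Practice | 프로그래머스/2/42586. 기능개발/기능개발.py | solution
-- ===== SOURCE A (Python) =====
-- import math
--
-- def solution(progresses, speeds):
--     ddays = [math.ceil((100 - p)/speeds[i]) for i, p in enumerate(progresses)]
--
--     res = []
--     visit = []
--     for i, d in enumerate(ddays):
--         if i in visit:
--             continue
--         count = 1
--         for j in range(i+1, len(ddays)):
--             if ddays[j] <= d:
--                 count += 1
--                 visit.append(j)
--             else:
--                 break
--         res.append(count)
--
--     return res
-- ===== SOURCE B (Python) =====
-- def solution(progresses, speeds):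
--     res = []
--     leader = None
--     count = 0
--     for p, s in zip(progresses, speeds):
--         d = -((p - 100) // s)
--         if leader is None or d > leader:
--             if count:
--                 res.append(count)
--             leader = d
--             count = 1
--         else:
--             count += 1
--     if count:
--         res.append(count)
--     return res
-- ===== Notes on version B (the rewrite author's own statement) =====
-- stated objective: faster
-- what changed: Replaces A's O(n^2) nested scan with a visited-index list (membership tests and re-scans per group) by a single linear pass over zip(progresses, speeds) that tracks the current group leader's deadline and a running count, flushing the count when a strictly later deadline starts a new group.
import Mathlib
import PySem

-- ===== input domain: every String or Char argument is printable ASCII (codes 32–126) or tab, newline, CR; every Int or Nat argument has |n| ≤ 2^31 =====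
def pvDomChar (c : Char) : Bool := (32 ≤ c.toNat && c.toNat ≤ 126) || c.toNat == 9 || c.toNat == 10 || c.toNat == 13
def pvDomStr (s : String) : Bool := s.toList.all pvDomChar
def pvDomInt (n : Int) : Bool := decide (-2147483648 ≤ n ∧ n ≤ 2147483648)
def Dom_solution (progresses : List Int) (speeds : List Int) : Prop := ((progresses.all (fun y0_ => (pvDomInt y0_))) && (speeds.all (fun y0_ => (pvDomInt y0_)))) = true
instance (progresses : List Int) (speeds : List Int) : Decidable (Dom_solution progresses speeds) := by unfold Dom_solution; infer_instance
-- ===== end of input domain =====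

-- B replaces A's quadratic visited-list grouping by one linear pass tracking the current
-- group leader's deadline (objective: faster; equivalence proved on Pre_ below).


-- ===== PORT A =====
-- math.ceil((100-p)/speeds[i]): on Dom |100-p| < 2^53, so the float division's ceiling is
-- the exact rational ceiling; ceil(a/b) = -((-a) floordiv b), exact via PySem.Int.floordiv.
def ddaysA (progresses : List Int) (speeds : List Int) : List Int :=
  progresses.zipIdx.map (fun pi =>
    -(PySem.Int.floordiv (-(100 - pi.1)) ((PySem.List.pyGet? speeds (Int.ofNat pi.2)).getD 0)))

-- inner 'for j in range(i+1, len(ddays)): … else break' loop: returns (count, visit)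
def innerA (D : List Int) (d : Int) (j : Nat) (count : Int) (visit : List Int) : Int × List Int :=
  if h : j < D.length then
    if D[j] ≤ d then innerA D d (j + 1) (count + 1) (visit ++ [(j : Int)])
    else (count, visit)
  else (count, visit)
termination_by D.length - j

-- outer 'for i, d in enumerate(ddays)' loop with the visited list
def outerA (D : List Int) (i : Nat) (res : List Int) (visit : List Int) : List Int :=
  if h : i < D.length then
    if (i : Int) ∈ visit then outerA D (i + 1) res visit
    else
      let cv := innerA D D[i] (i + 1) 1 visit
      outerA D (i + 1) (res ++ [cv.1]) cv.2
  else res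
termination_by D.length - i

def solution (progresses : List Int) (speeds : List Int) : List Int :=
  outerA (ddaysA progresses speeds) 0 [] []

-- ===== PORT B =====
-- d = -((p - 100) // s) = ceil((100-p)/s)
def dB (q : Int × Int) : Int := -(PySem.Int.floordiv (q.1 - 100) q.2)

-- single pass over zip(progresses, speeds): leader = current group's deadline,
-- count = current group's size, flushed when a strictly larger deadline starts a new group
def loopB : List (Int × Int) → Option Int → Int → List Int → List Int
  | [], _, count, res => if count ≠ 0 then res ++ [count] else res
  | q :: rest, leader, count, res =>
    let d : Int := dB q
    match leader with
    | none => loopB rest (some d) 1 (if count ≠ 0 then res ++ [count] else res)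
    | some L =>
      if d > L then loopB rest (some d) 1 (if count ≠ 0 then res ++ [count] else res)
      else loopB rest (some L) (count + 1) res

def solution_alt (progresses : List Int) (speeds : List Int) : List Int :=
  loopB (progresses.zip speeds) none 0 []

-- ===== PRECONDITION & SPEC =====
-- Pre_ excludes exactly the inputs where A raises: IndexError when speeds is shorter than
-- progresses, ZeroDivisionError when a used speed is 0.
def Pre_solution (progresses : List Int) (speeds : List Int) : Prop :=
  progresses.length ≤ speeds.length ∧ ∀ s ∈ speeds.take progresses.length, s ≠ 0
instance (progresses : List Int) (speeds : List Int) : Decidable (Pre_solution progresses speeds) := by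
  unfold Pre_solution; infer_instance
def pvWitness_solution : List Int × List Int := ([93, 30, 55], [1, 30, 5])

def Spec_solution (progresses : List Int) (speeds : List Int) (out : List Int) : Prop := out = solution_alt progresses speeds
instance (progresses : List Int) (speeds : List Int) (out : List Int) : Decidable (Spec_solution progresses speeds out) := by unfold Spec_solution; infer_instance

-- ===== CLAIM (what is proved, stated in full; the proofs are below) =====
def Claim_equal_solution : Prop := ∀ (progresses : List Int) (speeds : List Int), Dom_solution progresses speeds → Pre_solution progresses speeds → Spec_solution progresses speeds (solution progresses speeds)

-- ===== LEMMAS AND PROOFS =====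

-- index of the first j' ≥ j with D[j'] > d (or D.length)
def runEnd (D : List Int) (d : Int) (j : Nat) : Nat :=
  if h : j < D.length then (if D[j] ≤ d then runEnd D d (j + 1) else j) else j
termination_by D.length - j

lemma runEnd_ge (D : List Int) (d : Int) (j : Nat) : j ≤ runEnd D d j := by
  have key : ∀ fuel j, D.length - j ≤ fuel → j ≤ runEnd D d j := by
    intro fuel
    induction fuel with
    | zero =>
      intro j hj
      rw [runEnd]
      have : ¬ j < D.length := by omega
      simp [this]
    | succ f ih =>
      intro j hj
      rw [runEnd]
      split_ifs with h1 h2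
      · exact le_trans (by omega) (ih (j + 1) (by omega))
      · exact le_refl j
      · exact le_refl j
  exact key (D.length - j) j (le_refl _)

-- common mathematical description of the result: group sizes from index n on
def groupsFrom (D : List Int) (n : Nat) : List Int :=
  if h : n < D.length then
    ((runEnd D D[n] (n + 1) - n : Nat) : Int) :: groupsFrom D (runEnd D D[n] (n + 1))
  else []
termination_by D.length - n
decreasing_by
  have := runEnd_ge D D[n] (n + 1); omega

lemma groupsFrom_stop (D : List Int) (n : Nat) (h : ¬ n < D.length) : groupsFrom D n = [] := by
  rw [groupsFrom]; simp [h]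

lemma runEnd_le (D : List Int) (d : Int) (j : Nat) (hj : j ≤ D.length) :
    runEnd D d j ≤ D.length := by
  have key : ∀ fuel j, D.length - j ≤ fuel → j ≤ D.length → runEnd D d j ≤ D.length := by
    intro fuel
    induction fuel with
    | zero =>
      intro j hf hj
      rw [runEnd]
      have : ¬ j < D.length := by omega
      simp [this, hj]
    | succ f ih =>
      intro j hf hj
      rw [runEnd]
      split_ifs with h1 h2
      · exact ih (j + 1) (by omega) (by omega)
      · omega
      · omega
  exact key (D.length - j) j (le_refl _) hj

lemma runEnd_skip (D : List Int) (d : Int) (j m : Nat) (hjm : j ≤ m) (hml : m ≤ D.length)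
    (h : ∀ k : Nat, (hk : k < D.length) → j ≤ k → k < m → D[k] ≤ d) :
    runEnd D d j = runEnd D d m := by
  have key : ∀ fuel j, m - j ≤ fuel → j ≤ m →
      (∀ k : Nat, (hk : k < D.length) → j ≤ k → k < m → D[k] ≤ d) → runEnd D d j = runEnd D d m := by
    intro fuel
    induction fuel with
    | zero =>
      intro j hf hjm h
      have : j = m := by omega
      rw [this]
    | succ f ih =>
      intro j hf hjm h
      rcases Nat.eq_or_lt_of_le hjm with h1 | h1
      · rw [h1]
      · rw [runEnd]
        split_ifs with h2 h3
        · exact ih (j + 1) (by omega) (by omega) (fun k hk hjk hkm => h k hk (by omega) hkm)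
        · exact absurd (h j h2 (le_refl j) h1) h3
        · omega  -- j < m ≤ D.length contradicts ¬ j < D.length
  exact key (m - j) j (le_refl _) hjm h

lemma innerA_fst (D : List Int) (d : Int) (j : Nat) (c : Int) (v : List Int) :
    (innerA D d j c v).1 = c + ((runEnd D d j - j : Nat) : Int) := by
  have key : ∀ fuel j c v, D.length - j ≤ fuel →
      (innerA D d j c v).1 = c + ((runEnd D d j - j : Nat) : Int) := by
    intro fuel
    induction fuel with
    | zero =>
      intro j c v hf
      have hnlt : ¬ j < D.length := by omega
      rw [innerA, runEnd]
      simp [hnlt]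
    | succ f ih =>
      intro j c v hf
      rw [innerA, runEnd]
      split_ifs with h1 h2
      · rw [ih (j + 1) (c + 1) (v ++ [(j : Int)]) (by omega)]
        have h3 := runEnd_ge D d (j + 1)
        have : (runEnd D d (j + 1) - j : Nat) = (runEnd D d (j + 1) - (j + 1) : Nat) + 1 := by omega
        rw [this]
        push_cast
        ring
      · simp
      · simp
  exact key (D.length - j) j c v (le_refl _)

lemma innerA_snd_mem (D : List Int) (d : Int) (j : Nat) (c : Int) (v : List Int) (x : Int) :
    x ∈ (innerA D d j c v).2 ↔ x ∈ v ∨ ∃ k : Nat, x = (k : Int) ∧ j ≤ k ∧ k < runEnd D d j := by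
  have key : ∀ fuel j c v, D.length - j ≤ fuel →
      (x ∈ (innerA D d j c v).2 ↔ x ∈ v ∨ ∃ k : Nat, x = (k : Int) ∧ j ≤ k ∧ k < runEnd D d j) := by
    intro fuel
    induction fuel with
    | zero =>
      intro j c v hf
      have hnlt : ¬ j < D.length := by omega
      rw [innerA, runEnd]
      simp [hnlt]
    | succ f ih =>
      intro j c v hf
      rw [innerA, runEnd]
      split_ifs with h1 h2
      · rw [ih (j + 1) (c + 1) (v ++ [(j : Int)]) (by omega)]
        have hge := runEnd_ge D d (j + 1)
        constructor
        · rintro (hm | ⟨k, rfl, hk1, hk2⟩)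
          · rcases List.mem_append.mp hm with hm | hm
            · exact Or.inl hm
            · simp at hm
              exact Or.inr ⟨j, hm, le_refl _, by omega⟩
          · exact Or.inr ⟨k, rfl, by omega, hk2⟩
        · rintro (hm | ⟨k, rfl, hk1, hk2⟩)
          · exact Or.inl (List.mem_append.mpr (Or.inl hm))
          · rcases Nat.eq_or_lt_of_le hk1 with h | h
            · exact Or.inl (List.mem_append.mpr (Or.inr (by simp [← h])))
            · exact Or.inr ⟨k, rfl, by omega, hk2⟩
      · simp
      · simp
  exact key (D.length - j) j c v (le_refl _)

lemma outerA_eq_groupsFrom (D : List Int) (i n : Nat) (res visit : List Int)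
    (hin : i ≤ n) (hv : ∀ k : Nat, i ≤ k → ((k : Int) ∈ visit ↔ k < n)) :
    outerA D i res visit = res ++ groupsFrom D n := by
  have key : ∀ fuel i n res visit, D.length - i ≤ fuel → i ≤ n →
      (∀ k : Nat, i ≤ k → ((k : Int) ∈ visit ↔ k < n)) →
      outerA D i res visit = res ++ groupsFrom D n := by
    intro fuel
    induction fuel with
    | zero =>
      intro i n res visit hf hin hv
      have hnlt : ¬ i < D.length := by omega
      rw [outerA]
      simp [hnlt]
      rw [groupsFrom_stop D n (by omega)]
    | succ f ih =>
      intro i n res visit hf hin hv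
      rw [outerA]
      split_ifs with h1 h2
      · -- i visited, so i < n
        exact ih (i + 1) n res visit (by omega) (by have := (hv i (le_refl _)).mp h2; omega)
          (fun k hk => hv k (by omega))
      · -- i not visited: i = n
        have hieq : i = n := by
          have := (hv i (le_refl _))
          by_cases hlt : i < n
          · exact absurd (this.mpr hlt) h2
          · omega
        subst hieq
        have hge := runEnd_ge D D[i] (i + 1)
        have hle := runEnd_le D D[i] (i + 1) (by omega)
        rw [ih (i + 1) (runEnd D D[i] (i + 1)) (res ++ [(innerA D D[i] (i + 1) 1 visit).1])
            (innerA D D[i] (i + 1) 1 visit).2 (by omega) (by omega) ?_]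
        · have hrw : groupsFrom D i
              = ((runEnd D D[i] (i + 1) - i : Nat) : Int) :: groupsFrom D (runEnd D D[i] (i + 1)) := by
            rw [groupsFrom, dif_pos h1]
          rw [hrw, innerA_fst]
          have hc : (1 : Int) + ((runEnd D D[i] (i + 1) - (i + 1) : Nat) : Int)
              = ((runEnd D D[i] (i + 1) - i : Nat) : Int) := by omega
          rw [hc]
          simp
        · intro k hk
          rw [innerA_snd_mem]
          constructor
          · rintro (hm | ⟨k', hkk', hk1, hk2⟩)
            · have := (hv k (by omega)).mp hm; omega
            · have : k = k' := by exact_mod_cast hkk'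
              omega
          · intro hk2
            exact Or.inr ⟨k, rfl, by omega, hk2⟩
      · rw [groupsFrom_stop D n (by omega)]
        simp
  exact key (D.length - i) i n res visit (le_refl _) hin hv

lemma loopB_end (pairs : List (Int × Int)) (n : Nat) (hn : n < pairs.length) (res : List Int)
    (hgrp : ∀ (k : Nat) (hk : k < pairs.length), n < k → dB (pairs[k]'hk) ≤ dB (pairs[n]'hn)) :
    res ++ [((pairs.length - n : Nat) : Int)] = res ++ groupsFrom (pairs.map dB) n := by
  have hlt : n < (pairs.map dB).length := by simpa using hn
  have h1 : runEnd (pairs.map dB) ((pairs.map dB)[n]'hlt) (n + 1) = pairs.length := by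
    rw [runEnd_skip (pairs.map dB) _ (n + 1) pairs.length (by omega) (by simp)
        (by intro k hk h1 h2
            have hk' : k < pairs.length := by simpa using hk
            simp only [List.getElem_map]
            exact hgrp k hk' (by omega))]
    rw [runEnd]
    simp
  rw [groupsFrom, dif_pos hlt, h1, groupsFrom_stop _ _ (by simp)]

lemma loopB_eq (pairs : List (Int × Int)) (m n : Nat) (res : List Int)
    (hn : n < pairs.length) (hnm : n < m) (hm : m ≤ pairs.length)
    (hgrp : ∀ (k : Nat) (hk : k < pairs.length), n < k → k < m →
      dB (pairs[k]'hk) ≤ dB (pairs[n]'hn)) :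
    loopB (pairs.drop m) (some (dB (pairs[n]'hn))) ((m - n : Nat) : Int) res
      = res ++ groupsFrom (pairs.map dB) n := by
  have key : ∀ fuel m n (hn' : n < pairs.length) (res : List Int),
      pairs.length - m ≤ fuel → n < m → m ≤ pairs.length →
      (∀ (k : Nat) (hk : k < pairs.length), n < k → k < m →
        dB (pairs[k]'hk) ≤ dB (pairs[n]'hn')) →
      loopB (pairs.drop m) (some (dB (pairs[n]'hn'))) ((m - n : Nat) : Int) res
        = res ++ groupsFrom (pairs.map dB) n := by
    intro fuel
    induction fuel with
    | zero =>
      intro m n hn' res hf hnm hm hgrp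
      have hme : m = pairs.length := by omega
      subst hme
      rw [List.drop_length, loopB]
      rw [if_pos (by omega : ((pairs.length - n : Nat) : Int) ≠ 0)]
      exact loopB_end pairs n hn' res (fun k hk h1 => hgrp k hk h1 hk)
    | succ f ihf =>
      intro m n hn' res hf hnm hm hgrp
      by_cases hml : m < pairs.length
      · rw [List.drop_eq_getElem_cons hml]
        simp only [loopB]
        by_cases hcase : dB (pairs[m]'hml) > dB (pairs[n]'hn')
        · rw [if_pos hcase, if_pos (by omega : ((m - n : Nat) : Int) ≠ 0)]
          have hrec := ihf (m + 1) m hml (res ++ [((m - n : Nat) : Int)])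
            (by omega) (by omega) (by omega) (by intro k hk h1 h2; omega)
          have hone : ((m + 1 - m : Nat) : Int) = 1 := by omega
          rw [hone] at hrec
          rw [hrec]
          have hre : runEnd (pairs.map dB) ((pairs.map dB)[n]'(by simpa using hn')) (n + 1) = m := by
            rw [runEnd_skip (pairs.map dB) _ (n + 1) m (by omega) (by simpa using hml.le)
                (by intro k hk h1 h2
                    have hk' : k < pairs.length := by simpa using hk
                    simp only [List.getElem_map]
                    exact hgrp k hk' (by omega) h2)]
            rw [runEnd, dif_pos (by simpa using hml : m < (pairs.map dB).length)]
            rw [if_neg (by simpa using not_le.mpr hcase)]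
          have hgf : groupsFrom (pairs.map dB) n
              = ((m - n : Nat) : Int) :: groupsFrom (pairs.map dB) m := by
            rw [groupsFrom, dif_pos (by simpa using hn' : n < (pairs.map dB).length), hre]
          rw [hgf]
          simp
        · rw [if_neg hcase]
          have harith : ((m - n : Nat) : Int) + 1 = ((m + 1 - n : Nat) : Int) := by omega
          rw [harith]
          exact ihf (m + 1) n hn' res (by omega) (by omega) (by omega)
            (by intro k hk h1 h2
                by_cases hkm : k < m
                · exact hgrp k hk h1 hkm
                · have hkeq : k = m := by omega
                  subst hkeq
                  exact not_lt.mp hcase)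
      · have hme : m = pairs.length := by omega
        subst hme
        rw [List.drop_length, loopB]
        rw [if_pos (by omega : ((pairs.length - n : Nat) : Int) ≠ 0)]
        exact loopB_end pairs n hn' res (fun k hk h1 => hgrp k hk h1 hk)
  exact key (pairs.length - m) m n hn res (le_refl _) hnm hm hgrp

-- under Pre_, A's per-task deadlines agree with B's
lemma ddaysA_eq_map (progresses speeds : List Int) (hlen : progresses.length ≤ speeds.length) :
    ddaysA progresses speeds = (progresses.zip speeds).map dB := by
  apply List.ext_getElem
  · simp [ddaysA]
    omega
  · intro i h1 h2
    have hip : i < progresses.length := by simpa [ddaysA] using h1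
    have his : i < speeds.length := by omega
    simp only [ddaysA, List.getElem_map, List.getElem_zipIdx, List.getElem_zip, dB,
      Nat.zero_add, Int.ofNat_eq_natCast, PySem.List.pyGet?_natCast,
      List.getElem?_eq_getElem his, Option.getD_some]
    have harg : -(100 - progresses[i]) = progresses[i] - 100 := by ring
    rw [harg]

theorem solution_spec : Claim_equal_solution := by
  intro progresses speeds hdom hpre
  unfold Spec_solution solution solution_alt
  obtain ⟨hlen, -⟩ := hpre
  rw [ddaysA_eq_map progresses speeds hlen]
  rw [outerA_eq_groupsFrom _ 0 0 [] [] (le_refl 0) (by simp)]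
  cases hz : progresses.zip speeds with
  | nil =>
    rw [groupsFrom_stop _ _ (by simp), loopB]
    simp
  | cons q rest =>
    simp only [loopB, ne_eq, not_false_eq_true, if_neg, not_true_eq_false]
    have h0 : 0 < (q :: rest).length := by simp
    have heq := loopB_eq (q :: rest) 1 0 [] h0 (by omega) (by simp)
      (by intro k hk h1 h2; omega)
    have hone : ((1 - 0 : Nat) : Int) = 1 := by norm_num
    rw [hone] at heq
    simpa using heq.symm
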